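-- pv_equiv track=rewrite | github.com/CyberJutsu/Challenge-Writeups | DF Cyber Defense 2025/online/4-reverse-recovery/solution/scripts/solve.py | pick_flag_part2
-- ===== SOURCE A (Python) =====
-- from typing import Dict, Iterable, List, Optional, Tuple
--
-- def pick_flag_part2(contacts: Iterable[Dict[str, str]]) -> Optional[str]:
--     candidates: List[str] = []
--     for c in contacts:
--         for field in (c.get("name", ""), c.get("number", "")):
--             t = str(field).strip()
--             if not t:
--                 continue
--             if "second" in t.lower() or t.count("_") >= 2:
--                 return t
--             candidates.append(t)
--     return candidates[0] if candidates else None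
-- ===== SOURCE B (Python) =====
-- def pick_flag_part2(contacts):
--     # Two-pass: first flatten all non-empty stripped fields, then scan for the flag.
--     fields = []
--     for c in contacts:
--         for field in (c.get("name", ""), c.get("number", "")):
--             t = str(field).strip()
--             if t:
--                 fields.append(t)
--     for t in fields:
--         if "second" in t.lower() or t.count("_") >= 2:
--             return t
--     return fields[0] if fields else None
-- ===== Notes on version B (the rewrite author's own statement) =====
-- stated objective: alternative
-- what changed: Replaced A's single early-exit pass with candidate accumulation by a build-then-search decomposition: one pass materialises the flattened list of non-empty stripped fields, a second separate scan returns the first matching field, falling back to the first field.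
import Mathlib
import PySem

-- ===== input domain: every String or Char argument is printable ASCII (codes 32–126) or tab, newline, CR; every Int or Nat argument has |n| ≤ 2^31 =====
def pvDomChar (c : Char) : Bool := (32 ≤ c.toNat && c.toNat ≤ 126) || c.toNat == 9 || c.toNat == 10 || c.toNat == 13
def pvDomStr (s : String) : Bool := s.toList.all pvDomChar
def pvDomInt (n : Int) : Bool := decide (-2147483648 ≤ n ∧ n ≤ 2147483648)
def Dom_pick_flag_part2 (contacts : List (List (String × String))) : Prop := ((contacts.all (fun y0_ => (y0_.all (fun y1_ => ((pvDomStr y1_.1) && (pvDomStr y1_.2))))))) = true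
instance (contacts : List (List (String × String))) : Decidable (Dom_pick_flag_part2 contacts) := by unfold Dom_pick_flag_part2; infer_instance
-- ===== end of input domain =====

-- B replaces A's single early-exit pass (with a candidates accumulator) by a build-then-search
-- decomposition over the flattened field list; objective: alternative (same cost).

-- the flag test '"second" in t.lower() or t.count("_") >= 2' (shared text of both programs)
def pvMatch (t : String) : Bool :=
  PySem.Str.isIn "second" (PySem.Str.lower t) || decide ((PySem.Str.count t "_" : Nat) ≥ 2)

-- ===== PORT A =====
-- inner loop 'for field in (name, number)': early return = .inl t, else updated candidates
def pvA_inner : List String → List String → String ⊕ List String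
  | [], cand => .inr cand
  | f :: fs, cand =>
    let t := PySem.Str.strip f
    if t = "" then pvA_inner fs cand
    else if pvMatch t then .inl t
    else pvA_inner fs (cand ++ [t])

def pvA_go : List (List (String × String)) → List String → Option String
  | [], cand => cand.head?      -- candidates[0] if candidates else None
  | c :: rest, cand =>
    match pvA_inner [(PySem.Dict.mk c).getD "name" "", (PySem.Dict.mk c).getD "number" ""] cand with
    | .inl t => some t
    | .inr cand' => pvA_go rest cand'

def pick_flag_part2 (contacts : List (List (String × String))) : Option String :=
  pvA_go contacts []

-- ===== PORT B =====
-- pass 1, inner loop of a contact: append non-empty stripped fields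
def pvB_addFields : List String → List String → List String
  | [], fields => fields
  | f :: fs, fields =>
    let t := PySem.Str.strip f
    if t = "" then pvB_addFields fs fields else pvB_addFields fs (fields ++ [t])

-- pass 1, outer loop over contacts
def pvB_collect : List (List (String × String)) → List String → List String
  | [], fields => fields
  | c :: rest, fields =>
    pvB_collect rest
      (pvB_addFields [(PySem.Dict.mk c).getD "name" "", (PySem.Dict.mk c).getD "number" ""] fields)

-- pass 2: first matching field
def pvB_find : List String → Option String
  | [] => none
  | t :: ts => if pvMatch t then some t else pvB_find ts

def pick_flag_part2_alt (contacts : List (List (String × String))) : Option String :=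
  let fields := pvB_collect contacts []
  match pvB_find fields with
  | some t => some t
  | none => fields.head?      -- fields[0] if fields else None

-- ===== PRECONDITION & SPEC =====
def Spec_pick_flag_part2 (contacts : List (List (String × String))) (out : Option String) : Prop := out = pick_flag_part2_alt contacts
instance (contacts : List (List (String × String))) (out : Option String) : Decidable (Spec_pick_flag_part2 contacts out) := by unfold Spec_pick_flag_part2; infer_instance

-- ===== CLAIM (what is proved, stated in full; the proofs are below) =====
def Claim_equal_pick_flag_part2 : Prop := ∀ (contacts : List (List (String × String))), Dom_pick_flag_part2 contacts → Spec_pick_flag_part2 contacts (pick_flag_part2 contacts)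

-- ===== LEMMAS AND PROOFS =====

-- accumulator lemmas: both pass-1 loops only append
theorem pvB_addFields_acc (fs : List String) (fields : List String) :
    pvB_addFields fs fields = fields ++ pvB_addFields fs [] := by
  induction fs generalizing fields with
  | nil => simp [pvB_addFields]
  | cons f fs ih =>
    simp only [pvB_addFields]
    split_ifs with h
    · exact ih fields
    · simp only [List.nil_append]
      rw [ih (fields ++ [PySem.Str.strip f]), ih [PySem.Str.strip f]]
      simp

theorem pvB_collect_acc (cs : List (List (String × String))) (fields : List String) :
    pvB_collect cs fields = fields ++ pvB_collect cs [] := by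
  induction cs generalizing fields with
  | nil => simp [pvB_collect]
  | cons c rest ih =>
    simp only [pvB_collect]
    rw [ih, ih, pvB_addFields_acc _ fields]
    simp only [List.append_assoc, List.append_cancel_left_eq]
    exact (ih _).symm

theorem pvB_find_append (xs ys : List String) :
    pvB_find (xs ++ ys) = ((pvB_find xs).map some).getD (pvB_find ys) := by
  induction xs with
  | nil => simp [pvB_find]
  | cons x xs ih =>
    simp only [List.cons_append, pvB_find]
    split_ifs with h <;> simp [ih]

-- A's inner loop against B's: early return iff a match among the contact's fields
theorem pvA_inner_eq (fs : List String) (cand : List String) :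
    pvA_inner fs cand =
      match pvB_find (pvB_addFields fs []) with
      | some t => .inl t
      | none => .inr (cand ++ pvB_addFields fs []) := by
  induction fs generalizing cand with
  | nil => simp [pvA_inner, pvB_addFields, pvB_find]
  | cons f fs ih =>
    simp only [pvA_inner, pvB_addFields]
    split_ifs with h hm
    · exact ih cand
    · simp only [List.nil_append]
      rw [pvB_addFields_acc fs [PySem.Str.strip f]]
      simp [pvB_find, hm]
    · simp only [List.nil_append]
      rw [pvB_addFields_acc fs [PySem.Str.strip f], ih]
      simp only [List.singleton_append, pvB_find, hm]
      cases hf : pvB_find (pvB_addFields fs []) <;> simp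

-- main invariant: as long as no candidate matched, A's loop equals B's search over cand ++ rest-fields
theorem pvA_go_eq (cs : List (List (String × String))) (cand : List String)
    (hc : pvB_find cand = none) :
    pvA_go cs cand =
      match pvB_find (cand ++ pvB_collect cs []) with
      | some t => some t
      | none => (cand ++ pvB_collect cs []).head? := by
  induction cs generalizing cand with
  | nil => simp [pvA_go, pvB_collect, hc]
  | cons c rest ih =>
    simp only [pvA_go, pvB_collect]
    rw [pvA_inner_eq]
    set fc := pvB_addFields [(PySem.Dict.mk c).getD "name" "", (PySem.Dict.mk c).getD "number" ""] [] with hfc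
    cases hm : pvB_find fc with
    | some t =>
      simp only
      rw [pvB_collect_acc, pvB_find_append, hc]
      rw [pvB_find_append, hm]
      simp
    | none =>
      simp only
      rw [ih (cand ++ fc) (by rw [pvB_find_append, hc, hm]; simp)]
      rw [pvB_collect_acc rest fc]
      simp

-- ===== VERDICT (by name: the statement is the Claim_ definition above) =====
theorem pick_flag_part2_spec : Claim_equal_pick_flag_part2 := by
  intro contacts _
  unfold Spec_pick_flag_part2 pick_flag_part2 pick_flag_part2_alt
  rw [pvA_go_eq contacts [] rfl]
  simp
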